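-- pv_equiv track=rewrite | github.com/mombasawalafaizan/dsa_solution | Dynamic Programming/pairs_with_specific_difference.py | pairsWithDifference
-- ===== SOURCE A (Python) =====
-- def pairsWithDifference(arr, N, K):
--     arr.sort()
--     max_sum = arr[0]
--     prev = 0
--     for i in range(1, N):
--         max_sum += arr[i]
--         if arr[i] >= (arr[i-1]+K):
--             if (i-prev)%2!=0:
--                 max_sum -= arr[prev]
--             prev = i
--
--     if (N-prev)%2!=0:
--         max_sum -= arr[prev]
--     return max_sum
-- ===== SOURCE B (Python) =====
-- # Partition-based rewrite: group the sorted prefix into maximal runs of close values,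
-- # then compute the answer as one expression over the groups (B also sorts arr in place,
-- # like A; return value only is what the Lean file proves equal).
-- def pairsWithDifference(arr, N, K):
--     arr.sort()
--     groups = []
--     cur = []
--     for x in arr[:max(0, N)]:
--         if cur and x - cur[-1] < K:
--             cur.append(x)
--         else:
--             if cur:
--                 groups.append(cur)
--             cur = [x]
--     if cur:
--         groups.append(cur)
--     return sum(sum(g) for g in groups) - sum(g[0] for g in groups if len(g) % 2)
-- ===== Notes on version B (the rewrite author's own statement) =====
-- stated objective: alternative
-- what changed: Instead of a fused index scan with a prev pointer and eager parity subtraction, B materialises the sorted prefix's partition into maximal runs of close values (lists of values, no indices) and computes the result as one expression: total of all groups minus the first element of each odd-length group.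
-- intended difference: On nonpositive N (an empty prefix) with N even and arr's minimum nonzero, A returns arr's minimum (the seed max_sum = arr[0] left over from before the loop; for odd N its final parity step happens to cancel it) while B returns 0, the correct maximal pair sum of an empty prefix. — e.g. on pairsWithDifference([5], 0, 1): A returns 5, B returns 0
import Mathlib
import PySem

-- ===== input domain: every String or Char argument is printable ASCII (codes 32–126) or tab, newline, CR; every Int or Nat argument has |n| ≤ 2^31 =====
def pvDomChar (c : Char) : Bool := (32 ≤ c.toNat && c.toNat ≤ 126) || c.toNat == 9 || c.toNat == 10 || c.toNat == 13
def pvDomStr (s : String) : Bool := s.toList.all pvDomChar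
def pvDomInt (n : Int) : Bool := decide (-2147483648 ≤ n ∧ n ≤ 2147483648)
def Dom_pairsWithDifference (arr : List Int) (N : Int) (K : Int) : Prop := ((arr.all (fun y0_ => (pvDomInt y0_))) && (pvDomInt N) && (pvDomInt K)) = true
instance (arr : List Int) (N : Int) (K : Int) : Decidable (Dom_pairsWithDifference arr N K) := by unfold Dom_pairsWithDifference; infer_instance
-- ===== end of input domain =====

-- B partitions the sorted prefix arr[:N] into maximal runs of close values (lists of
-- values, no indices) and computes the result as one expression over that partition,
-- instead of A's fused index scan with a prev pointer.  Both Pythons sort arr in place;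
-- the equivalence proved here is about the return value (the mutation is identical).

-- ===== PORT A =====
-- loop body of A, over the sorted list a: state (max_sum, prev)
def pvStepA (a : List Int) (K : Int) (s : Int × Int) (i : Int) : Int × Int :=
  let ms := s.1 + PySem.List.pyGetD a i 0
  if PySem.List.pyGetD a i 0 ≥ PySem.List.pyGetD a (i - 1) 0 + K then
    (if PySem.Int.mod (i - s.2) 2 ≠ 0 then ms - PySem.List.pyGetD a s.2 0 else ms, i)
  else (ms, s.2)

def pairsWithDifference (arr : List Int) (N : Int) (K : Int) : Int :=
  let a := PySem.List.sorted arr (fun x => x) false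
  let s := (PySem.List.pyRange 1 N 1).foldl (pvStepA a K) (PySem.List.pyGetD a 0 0, 0)
  if PySem.Int.mod (N - s.2) 2 ≠ 0 then s.1 - PySem.List.pyGetD a s.2 0 else s.1

-- ===== PORT B =====
-- loop body of B: state (groups, cur); 'cur and x - cur[-1] < K' → append, else flush
def pvStepB (K : Int) (s : List (List Int) × List Int) (x : Int) : List (List Int) × List Int :=
  match s.2.getLast? with
  | some lx => if x - lx < K then (s.1, s.2 ++ [x]) else (s.1 ++ [s.2], [x])
  | none => (s.1, [x])

def pairsWithDifference_alt (arr : List Int) (N : Int) (K : Int) : Int :=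
  let a := PySem.List.sorted arr (fun x => x) false
  let s := (PySem.List.slice a none (some (max 0 N))).foldl (pvStepB K) ([], [])
  let groups := if s.2 = [] then s.1 else s.1 ++ [s.2]
  (groups.map List.sum).sum - ((groups.filter (fun g => g.length % 2 == 1)).map List.headI).sum

-- ===== PRECONDITION & SPEC =====
-- Pre_ excludes exactly the inputs where the Python A raises IndexError:
-- empty arr (arr[0]) and N > len(arr) (arr[i] inside the loop).
def Pre_pairsWithDifference (arr : List Int) (N : Int) (K : Int) : Prop :=
  arr ≠ [] ∧ N ≤ (arr.length : Int)
instance (arr : List Int) (N : Int) (K : Int) : Decidable (Pre_pairsWithDifference arr N K) := by unfold Pre_pairsWithDifference; infer_instance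
def pvWitness_pairsWithDifference : List Int × Int × Int := ([1, 2, 3], 3, 1)

-- On N ≤ 0 (an empty prefix) with N even and arr's minimum nonzero, A returns arr's
-- minimum (the seed max_sum = arr[0] left over from before the loop) while B returns 0,
-- the correct maximal pair sum of an empty prefix.
def D_pairsWithDifference (arr : List Int) (N : Int) (K : Int) : Prop :=
  N ≤ 0 ∧ N % 2 = 0 ∧ ¬ ((0 : Int) ∈ arr ∧ ∀ x ∈ arr, 0 ≤ x)
instance (arr : List Int) (N : Int) (K : Int) : Decidable (D_pairsWithDifference arr N K) := by unfold D_pairsWithDifference; infer_instance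

def Spec_pairsWithDifference (arr : List Int) (N : Int) (K : Int) (out : Int) : Prop := ¬ D_pairsWithDifference arr N K → out = pairsWithDifference_alt arr N K
instance (arr : List Int) (N : Int) (K : Int) (out : Int) : Decidable (Spec_pairsWithDifference arr N K out) := by unfold Spec_pairsWithDifference; infer_instance

def pvDiffWitness_pairsWithDifference : List Int × Int × Int := ([5], 0, 1)
def pvDiffWitnessOut_pairsWithDifference : Int × Int := (5, 0)

-- ===== CLAIM (what is proved, stated in full; the proofs are below) =====
def Claim_unchanged_pairsWithDifference : Prop := ∀ (arr : List Int) (N : Int) (K : Int), Dom_pairsWithDifference arr N K → Pre_pairsWithDifference arr N K → Spec_pairsWithDifference arr N K (pairsWithDifference arr N K)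
def Claim_changed_pairsWithDifference : Prop := Dom_pairsWithDifference (pvDiffWitness_pairsWithDifference.1) (pvDiffWitness_pairsWithDifference.2.1) (pvDiffWitness_pairsWithDifference.2.2) ∧ Pre_pairsWithDifference (pvDiffWitness_pairsWithDifference.1) (pvDiffWitness_pairsWithDifference.2.1) (pvDiffWitness_pairsWithDifference.2.2) ∧ D_pairsWithDifference (pvDiffWitness_pairsWithDifference.1) (pvDiffWitness_pairsWithDifference.2.1) (pvDiffWitness_pairsWithDifference.2.2) ∧ pairsWithDifference (pvDiffWitness_pairsWithDifference.1) (pvDiffWitness_pairsWithDifference.2.1) (pvDiffWitness_pairsWithDifference.2.2) = pvDiffWitnessOut_pairsWithDifference.1 ∧ pairsWithDifference_alt (pvDiffWitness_pairsWithDifference.1) (pvDiffWitness_pairsWithDifference.2.1) (pvDiffWitness_pairsWithDifference.2.2) = pvDiffWitnessOut_pairsWithDifference.2 ∧ pvDiffWitnessOut_pairsWithDifference.1 ≠ pvDiffWitnessOut_pairsWithDifference.2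
def Claim_exact_pairsWithDifference : Prop := ∀ (arr : List Int) (N : Int) (K : Int), Dom_pairsWithDifference arr N K → Pre_pairsWithDifference arr N K → D_pairsWithDifference arr N K → pairsWithDifference arr N K ≠ pairsWithDifference_alt arr N K

-- ===== LEMMAS AND PROOFS =====

-- the odd-group correction term of B's final expression
def pvCorr (gs : List (List Int)) : Int :=
  ((gs.filter (fun g => g.length % 2 == 1)).map List.headI).sum

lemma pvCorr_append_singleton (gs : List (List Int)) (c : List Int) :
    pvCorr (gs ++ [c]) = pvCorr gs + (if c.length % 2 = 1 then c.headI else 0) := by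
  simp only [pvCorr, List.filter_append, List.map_append, List.sum_append]
  by_cases h : c.length % 2 = 1 <;> simp [beq_iff_eq, h]

-- simulation invariant: after processing the first k elements (k ≥ 1) of the sorted
-- list a, A's fused state and B's partition state correspond.
lemma pv_inv (a : List Int) (K : Int) :
    ∀ k : Nat, 1 ≤ k → k ≤ a.length →
    ∃ (gs : List (List Int)) (cur : List Int) (p : Int),
      (PySem.List.pyRange 1 (k : Int) 1).foldl (pvStepA a K) (PySem.List.pyGetD a 0 0, 0)
          = ((a.take k).sum - pvCorr gs, p) ∧
      (a.take k).foldl (pvStepB K) ([], []) = (gs, cur) ∧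
      cur ≠ [] ∧
      PySem.List.pyGetD a p 0 = cur.headI ∧
      ((k : Int) - p = (cur.length : Int)) ∧
      cur.getLast? = some (a.getD (k - 1) 0) ∧
      gs.flatten ++ cur = a.take k := by
  intro k hk
  induction k, hk using Nat.le_induction with
  | base =>
    intro hlen
    match a, hlen with
    | x :: t, _ =>
      refine ⟨[], [x], 0, ?_, ?_, by simp, ?_, by simp, by simp, by simp⟩
      · simp [PySem.List.pyRange_one_eq_nil, pvCorr, PySem.List.pyGetD_zero_cons]
      · simp [pvStepB]
      · simp [PySem.List.pyGetD_zero_cons]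
  | succ k hk ih =>
    intro hlen
    have hklen : k < a.length := by omega
    obtain ⟨gs, cur, p, hA, hB, hcne, hhead, hlenp, hlast, hflat⟩ := ih (by omega)
    have htake : a.take (k + 1) = a.take k ++ [a[k]] := by
      rw [List.take_succ, List.getElem?_eq_getElem hklen]; rfl
    have hxk : PySem.List.pyGetD a ((k : Int)) 0 = a[k] := by
      rw [PySem.List.pyGetD_natCast, List.getD_eq_getElem _ _ hklen]
    have hcast : ((k : Int) + 1 - 1) = ((k : Int)) := by ring
    have hprev : PySem.List.pyGetD a ((k : Int) - 1) 0 = a.getD (k - 1) 0 := by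
      have : ((k : Int) - 1) = ((k - 1 : Nat) : Int) := by omega
      rw [this, PySem.List.pyGetD_natCast]
    have hrange : PySem.List.pyRange 1 ((k : Int) + 1) 1
        = PySem.List.pyRange 1 (k : Int) 1 ++ [(k : Int)] := by
      exact PySem.List.pyRange_one_succ_right (by exact_mod_cast hk)
    have hsum : (a.take (k + 1)).sum = (a.take k).sum + a[k] := by
      rw [htake, List.sum_append]; simp
    have hcond : (PySem.List.pyGetD a ((k : Int)) 0 ≥ PySem.List.pyGetD a ((k : Int) - 1) 0 + K)
        ↔ ¬ (a[k] - a.getD (k - 1) 0 < K) := by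
      rw [hxk, hprev]; omega
    have hclose' := fun (h : a[k] - a.getD (k - 1) 0 < K) => by
      simpa [List.getD_eq_getElem?_getD] using h
    obtain ⟨c, cur', hc⟩ : ∃ c cur', cur = c :: cur' := by
      cases cur with | nil => exact absurd rfl hcne | cons c cur' => exact ⟨c, cur', rfl⟩
    by_cases hclose : a[k] - a.getD (k - 1) 0 < K
    · -- close: B appends to cur, A does not start a new group
      refine ⟨gs, cur ++ [a[k]], p, ?_, ?_, by simp, ?_, ?_, ?_, ?_⟩
      · push_cast
        rw [hrange, List.foldl_append, hA]
        simp only [List.foldl_cons, List.foldl_nil, pvStepA]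
        rw [if_neg (by rw [hcond]; exact not_not_intro hclose)]
        simp only [Prod.mk.injEq]
        refine ⟨by rw [hxk, hsum]; ring, trivial⟩
      · rw [htake, List.foldl_append, hB]
        simp only [List.foldl_cons, List.foldl_nil, pvStepB, hlast]
        rw [if_pos (by simpa [List.getD_eq_getElem?_getD] using hclose)]
      · rw [hhead, hc]; simp
      · have h5 := hlenp
        simp only [List.length_append, List.length_cons, List.length_nil]
        push_cast
        omega
      · simp [List.getLast?_concat, List.getD_eq_getElem?_getD, List.getElem?_eq_getElem hklen]
      · rw [htake, ← hflat, List.append_assoc]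
    · -- far: B flushes cur, A starts a new group (and fixes up parity)
      refine ⟨gs ++ [cur], [a[k]], (k : Int), ?_, ?_, by simp, ?_, by push_cast; ring_nf; simp, ?_, ?_⟩
      · push_cast
        rw [hrange, List.foldl_append, hA]
        simp only [List.foldl_cons, List.foldl_nil, pvStepA]
        rw [if_pos (by rw [hcond]; exact hclose)]
        have hmod : PySem.Int.mod ((k : Int) - p) 2 = ((cur.length % 2 : Nat) : Int) := by
          rw [hlenp]; exact_mod_cast PySem.Int.mod_natCast cur.length 2
        rw [pvCorr_append_singleton]
        by_cases hodd : cur.length % 2 = 1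
        · rw [if_pos (by rw [hmod, hodd]; decide), if_pos hodd]
          simp only [Prod.mk.injEq]
          refine ⟨by rw [hxk, hhead, hsum]; ring, trivial⟩
        · rw [if_neg (by rw [hmod]; simp; omega), if_neg hodd]
          simp only [Prod.mk.injEq]
          refine ⟨by rw [hxk, hsum]; ring, trivial⟩
      · rw [htake, List.foldl_append, hB]
        simp only [List.foldl_cons, List.foldl_nil, pvStepB, hlast]
        rw [if_neg (by simpa [List.getD_eq_getElem?_getD] using hclose)]
      · rw [hxk]; simp
      · simp [List.getD_eq_getElem?_getD, List.getElem?_eq_getElem hklen]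
      · rw [List.flatten_append]
        simp only [List.flatten_cons, List.flatten_nil, List.append_nil, List.append_assoc]
        rw [htake, ← hflat, List.append_assoc]

-- the head of the sorted list is the minimum of arr
lemma pv_head_sorted (arr : List Int) (m : Int) (t : List Int)
    (h : PySem.List.sorted arr (fun x => x) false = m :: t) :
    m ∈ arr ∧ ∀ y ∈ arr, m ≤ y := by
  constructor
  · have : m ∈ PySem.List.sorted arr (fun x => x) false := by rw [h]; simp
    rwa [PySem.List.mem_sorted] at this
  · intro y hy
    exact PySem.List.key_head_sorted_le arr (fun x => x) h y hy

-- ===== VERDICT (by name: the statement is the Claim_ definition above) =====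
theorem pairsWithDifference_spec : Claim_unchanged_pairsWithDifference := by
  intro arr N K _ hpre hnd
  obtain ⟨hne, hNlen⟩ := hpre
  simp only [pairsWithDifference, pairsWithDifference_alt]
  have hlen : (PySem.List.sorted arr (fun x => x) false).length = arr.length :=
    PySem.List.length_sorted arr _ _
  have hslice : PySem.List.slice (PySem.List.sorted arr (fun x => x) false) none (some (max 0 N))
      = (PySem.List.sorted arr (fun x => x) false).take (max 0 N).toNat :=
    PySem.List.slice_to _ (le_max_left 0 N)
  by_cases hN : N ≤ 0
  · -- N ≤ 0, not in D_: the loop and B's prefix are both empty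
    have hmax : (max (0 : Int) N) = 0 := by omega
    rw [hmax] at hslice
    obtain ⟨m, t, hsort⟩ : ∃ m t, PySem.List.sorted arr (fun x => x) false = m :: t := by
      cases hs : PySem.List.sorted arr (fun x => x) false with
      | nil => exact absurd ((PySem.List.sorted_eq_nil_iff _ _ _).1 hs) hne
      | cons m t => exact ⟨m, t, rfl⟩
    rw [hsort] at hslice
    rw [hsort, hmax, hslice, PySem.List.pyRange_one_eq_nil (by omega : N ≤ 1)]
    by_cases he : N % 2 = 0
    · -- N even: ¬ D_ forces the minimum of arr to be 0, so A returns 0 = B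
      have hmin : (0 : Int) ∈ arr ∧ ∀ x ∈ arr, 0 ≤ x := by
        by_contra hc
        exact hnd ⟨hN, he, hc⟩
      have hm0 : m = 0 := by
        obtain ⟨hmem, hle⟩ := pv_head_sorted arr m t hsort
        exact le_antisymm (hle 0 hmin.1) (hmin.2 m hmem)
      have hdvd : (2 : Int) ∣ N := Int.dvd_of_emod_eq_zero he
      simp [PySem.List.pyGetD_zero_cons, hm0, PySem.Int.mod_eq_zero_iff_dvd, hdvd]
    · -- N odd: A's final parity step subtracts the seed back out, 0 = B
      have hdvd : ¬ (2 : Int) ∣ N := fun h => he (Int.emod_eq_zero_of_dvd h)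
      simp [PySem.List.pyGetD_zero_cons, PySem.Int.mod_eq_zero_iff_dvd, hdvd]
  · -- 1 ≤ N ≤ len
    have hmax : (max (0 : Int) N) = N := by omega
    rw [hmax] at hslice
    rw [hmax]
    set a := PySem.List.sorted arr (fun x => x) false with ha
    set k := N.toNat with hkdef
    have hkN : (k : Int) = N := Int.toNat_of_nonneg (by omega)
    obtain ⟨gs, cur, p, hA, hB, hcne, hhead, hlenp, _, hflat⟩ :=
      pv_inv a K k (by omega) (by omega)
    rw [hslice, ← hkN, hA, hB]
    simp only [if_neg hcne]
    have hsum2 : ((gs ++ [cur]).map List.sum).sum = (a.take k).sum := by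
      rw [← hflat, List.map_append, List.sum_append, ← List.sum_flatten]
      simp
    have hcorr : (((gs ++ [cur]).filter (fun g => g.length % 2 == 1)).map List.headI).sum
        = pvCorr gs + (if cur.length % 2 = 1 then cur.headI else 0) := by
      rw [show (((gs ++ [cur]).filter (fun g => g.length % 2 == 1)).map List.headI).sum
            = pvCorr (gs ++ [cur]) from rfl, pvCorr_append_singleton]
    rw [hsum2, hcorr]
    have hmod : PySem.Int.mod ((k : Int) - p) 2 = ((cur.length % 2 : Nat) : Int) := by
      rw [hlenp]; exact_mod_cast PySem.Int.mod_natCast cur.length 2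
    by_cases hodd : cur.length % 2 = 1
    · rw [if_pos (by rw [hmod, hodd]; decide), if_pos hodd, hhead]; ring
    · rw [if_neg (by rw [hmod]; simp; omega), if_neg hodd]; ring

theorem pairsWithDifference_changed : Claim_changed_pairsWithDifference := by
  unfold Claim_changed_pairsWithDifference; decide

theorem pairsWithDifference_tight : Claim_exact_pairsWithDifference := by
  intro arr N K _ hpre hd
  obtain ⟨hne, _⟩ := hpre
  obtain ⟨hN, he, hmin⟩ := hd
  simp only [pairsWithDifference, pairsWithDifference_alt]
  obtain ⟨m, t, hsort⟩ : ∃ m t, PySem.List.sorted arr (fun x => x) false = m :: t := by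
    cases hs : PySem.List.sorted arr (fun x => x) false with
    | nil => exact absurd ((PySem.List.sorted_eq_nil_iff _ _ _).1 hs) hne
    | cons m t => exact ⟨m, t, rfl⟩
  obtain ⟨hmem, hle⟩ := pv_head_sorted arr m t hsort
  have hm0 : m ≠ 0 := by
    intro h
    subst h
    exact hmin ⟨hmem, hle⟩
  have hmax : (max (0 : Int) N) = 0 := by omega
  rw [hsort, hmax]
  have hslice : PySem.List.slice (m :: t) none (some (0 : Int)) = [] := by
    rw [PySem.List.slice_to _ le_rfl]; rfl
  rw [hslice, PySem.List.pyRange_one_eq_nil (by omega : N ≤ 1)]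
  have hdvd : (2 : Int) ∣ N := Int.dvd_of_emod_eq_zero he
  simpa [PySem.List.pyGetD_zero_cons, PySem.Int.mod_eq_zero_iff_dvd, hdvd] using hm0
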